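-- pv_equiv track=rewrite | github.com/MeritEnding/algorithm | 프로그래머스/0/181890. 왼쪽 오른쪽/왼쪽 오른쪽.py | solution
-- ===== SOURCE A (Python) =====
-- def solution(str_list):
--     answer=[]
--     for i in range(len(str_list)):
--         a=str_list[i]
--         if a == "l":
--             answer=str_list[:i]
--             break
--
--         elif a =="r":
--             answer=str_list[i+1:]
--             break
--
--     return answer
-- ===== SOURCE B (Python) =====
-- def solution(str_list):
--     try:
--         li = str_list.index("l")
--     except ValueError:
--         li = None
--     try:
--         ri = str_list.index("r")
--     except ValueError:
--         ri = None
--     if li is None and ri is None: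
--         return []
--     if ri is None or (li is not None and li < ri):
--         return str_list[:li]
--     return str_list[ri + 1:]
-- ===== Notes on version B (the rewrite author's own statement) =====
-- stated objective: alternative
-- what changed: Instead of one combined index loop with early breaks, B locates the first 'l' and the first 'r' separately with list.index and then branches on which comes first.
import Mathlib
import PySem

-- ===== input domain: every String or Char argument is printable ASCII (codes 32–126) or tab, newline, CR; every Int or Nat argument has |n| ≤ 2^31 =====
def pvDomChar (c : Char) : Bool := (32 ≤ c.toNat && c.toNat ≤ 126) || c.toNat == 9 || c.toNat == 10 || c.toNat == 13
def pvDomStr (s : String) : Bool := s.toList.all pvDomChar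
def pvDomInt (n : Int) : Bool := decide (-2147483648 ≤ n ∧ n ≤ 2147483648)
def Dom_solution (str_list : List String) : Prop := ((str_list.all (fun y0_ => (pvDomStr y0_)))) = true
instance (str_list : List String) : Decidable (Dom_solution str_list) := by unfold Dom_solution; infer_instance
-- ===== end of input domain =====

-- B replaces A's single early-break index loop by locating the first 'l' and first 'r'
-- separately and branching on which comes first (alternative decomposition, same cost).

-- ===== PORT A =====
-- the for-loop over range(len(str_list)) with its two break slices, as structural recursion on the index list
def solutionGo (full : List String) : List Nat → List String
  | [] => []
  | i :: rest =>
    let a := PySem.List.pyGetD full (i : Int) ""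
    if a = "l" then PySem.List.slice full none (some (i : Int))
    else if a = "r" then PySem.List.slice full (some ((i : Int) + 1)) none
    else solutionGo full rest

def solution (str_list : List String) : List String :=
  solutionGo str_list (List.range str_list.length)

-- ===== PORT B =====
def solution_alt (str_list : List String) : List String :=
  let li := PySem.List.index? str_list "l"
  let ri := PySem.List.index? str_list "r"
  match li, ri with
  | none, none => []
  | some l, none => PySem.List.slice str_list none (some (l : Int))
  | none, some r => PySem.List.slice str_list (some ((r : Int) + 1)) none
  | some l, some r =>
    if l < r then PySem.List.slice str_list none (some (l : Int))
    else PySem.List.slice str_list (some ((r : Int) + 1)) none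

-- ===== PRECONDITION & SPEC =====
def Spec_solution (str_list : List String) (out : List String) : Prop := out = solution_alt str_list
instance (str_list : List String) (out : List String) : Decidable (Spec_solution str_list out) := by unfold Spec_solution; infer_instance

-- ===== CLAIM (what is proved, stated in full; the proofs are below) =====
def Claim_equal_solution : Prop := ∀ (str_list : List String), Dom_solution str_list → Spec_solution str_list (solution str_list)

-- ===== LEMMAS AND PROOFS =====

theorem index?_append_of_not_mem {α : Type} [DecidableEq α] (pre t : List α) (v : α)
    (h : v ∉ pre) :
    PySem.List.index? (pre ++ t) v = (PySem.List.index? t v).map (· + pre.length) := by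
  induction pre with
  | nil => simp [Option.map_id']
  | cons x xs ih =>
    have hx : x ≠ v := fun hxv => h (hxv ▸ List.mem_cons_self)
    have hxs : v ∉ xs := fun hv => h (List.mem_cons_of_mem _ hv)
    simp only [List.cons_append, PySem.List.index?_cons_of_ne _ hx, ih hxs]
    cases PySem.List.index? t v <;> simp; omega

theorem solution_key (suf : List String) : ∀ pre : List String,
    "l" ∉ pre → "r" ∉ pre →
    solutionGo (pre ++ suf) (List.range' pre.length suf.length) = solution_alt (pre ++ suf) := by
  induction suf with
  | nil =>
    intro pre hl hr
    have h1 := (PySem.List.index?_eq_none_iff pre "l").mpr hl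
    have h2 := (PySem.List.index?_eq_none_iff pre "r").mpr hr
    simp only [PySem.List.index?_eq_idxOf?] at h1 h2
    simp only [List.append_nil, List.length_nil, List.range'_zero]
    simp [solutionGo, solution_alt, h1, h2]
  | cons x rest ih =>
    intro pre hl hr
    have hil := index?_append_of_not_mem pre (x :: rest) "l" hl
    have hir := index?_append_of_not_mem pre (x :: rest) "r" hr
    have hget : PySem.List.pyGetD (pre ++ x :: rest) ((pre.length : Nat) : Int) "" = x := by
      simp [PySem.List.pyGetD_natCast, List.getD]
    simp only [List.length_cons]
    rw [List.range'_succ]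
    have hdrop : PySem.List.slice (pre ++ x :: rest) (some (((pre.length : Nat) : Int) + 1)) none
        = rest := by
      have h3 : ((pre.length : Nat) : Int) + 1 = ((pre.length + 1 : Nat) : Int) := by push_cast; ring
      rw [h3, PySem.List.slice_from_natCast]
      rw [show pre ++ x :: rest = (pre ++ [x]) ++ rest by simp]
      rw [List.drop_left' (by simp)]
    by_cases hx : x = "l"
    · subst hx
      have hli : PySem.List.index? (pre ++ "l" :: rest) "l" = some pre.length := by
        rw [hil, PySem.List.index?_cons_self]; simp
      simp only [solutionGo, hget]
      unfold solution_alt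
      rw [hli, hir, PySem.List.index?_cons_of_ne _ (by decide : ("l" : String) ≠ "r")]
      cases h2 : PySem.List.index? rest "r" with
      | none =>
        simp [PySem.List.slice_to_natCast]
      | some r =>
        have hlt : pre.length < r + 1 + pre.length := by omega
        simp [hlt, PySem.List.slice_to_natCast]
    · by_cases hx2 : x = "r"
      · subst hx2
        have hri : PySem.List.index? (pre ++ "r" :: rest) "r" = some pre.length := by
          rw [hir, PySem.List.index?_cons_self]; simp
        simp only [solutionGo, hget, if_neg (by decide : ¬ ("r" : String) = "l")]
        unfold solution_alt
        rw [hri, hil, PySem.List.index?_cons_of_ne _ (by decide : ("r" : String) ≠ "l")]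
        cases h2 : PySem.List.index? rest "l" with
        | none => simpa using hdrop
        | some l =>
          have hnlt : ¬ (l + 1 + pre.length < pre.length) := by omega
          simp only [Option.map_some, if_neg hnlt]
          simpa using hdrop
      · have step : solutionGo (pre ++ x :: rest) (pre.length :: List.range' (pre.length + 1) rest.length)
            = solutionGo (pre ++ x :: rest) (List.range' (pre.length + 1) rest.length) := by
          simp [solutionGo, hget, hx, hx2]
        rw [step]
        have hre : pre ++ x :: rest = (pre ++ [x]) ++ rest := by simp
        have hlen : pre.length + 1 = (pre ++ [x]).length := by simp
        rw [hre, hlen]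
        refine ih (pre ++ [x]) ?_ ?_
        · simp only [List.mem_append, List.mem_singleton]
          rintro (h | h)
          · exact hl h
          · exact hx h.symm
        · simp only [List.mem_append, List.mem_singleton]
          rintro (h | h)
          · exact hr h
          · exact hx2 h.symm

-- ===== VERDICT (by name: the statement is the Claim_ definition above) =====
theorem solution_spec : Claim_equal_solution := by
  intro str_list _
  unfold Spec_solution solution
  have := solution_key str_list [] (by simp) (by simp)
  simpa [List.range_eq_range'] using this
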